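-- pv_equiv track=rewrite | github.com/412984588/clawdh | Documents/cursor/坏蛋系统/simple_discovery_system/deduplication_agent.py | check_same_hosting_service
-- ===== SOURCE A (Python) =====
-- def check_same_hosting_service(domain1, domain2):
--     """检查是否使用相同的托管服务"""
--     # 简化版本：检查常见的CDN模式
--     cdn_indicators = ['cloudflare', 'aws', 'azure', 'heroku', 'netlify', 'vercel']
--
--     domain1_lower = domain1.lower()
--     domain2_lower = domain2.lower()
--
--     for cdn in cdn_indicators:
--         if cdn in domain1_lower and cdn in domain2_lower:
--             return True
--
--     return False
-- ===== SOURCE B (Python) =====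
-- def check_same_hosting_service(domain1, domain2):
--     """检查是否使用相同的托管服务"""
--     cdn_indicators = ['cloudflare', 'aws', 'azure', 'heroku', 'netlify', 'vercel']
--
--     def indicator_mask(domain):
--         # scan every position of the lowered domain; set bit b when
--         # indicator b starts at that position (naive multi-pattern matcher)
--         d = domain.lower()
--         m = 0
--         for i in range(len(d) + 1):
--             for bit, cdn in enumerate(cdn_indicators):
--                 if d[i:i + len(cdn)] == cdn:
--                     m |= 1 << bit
--         return m
--
--     return indicator_mask(domain1) & indicator_mask(domain2) != 0
-- ===== Notes on version B (the rewrite author's own statement) =====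
-- stated objective: alternative
-- what changed: Replaces A's per-indicator substring-membership loop with a naive multi-pattern position scan: for each domain it walks every start position of the lowered string, sets a bit for each indicator that begins there, and decides by ANDing the two bitmasks.
import Mathlib
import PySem

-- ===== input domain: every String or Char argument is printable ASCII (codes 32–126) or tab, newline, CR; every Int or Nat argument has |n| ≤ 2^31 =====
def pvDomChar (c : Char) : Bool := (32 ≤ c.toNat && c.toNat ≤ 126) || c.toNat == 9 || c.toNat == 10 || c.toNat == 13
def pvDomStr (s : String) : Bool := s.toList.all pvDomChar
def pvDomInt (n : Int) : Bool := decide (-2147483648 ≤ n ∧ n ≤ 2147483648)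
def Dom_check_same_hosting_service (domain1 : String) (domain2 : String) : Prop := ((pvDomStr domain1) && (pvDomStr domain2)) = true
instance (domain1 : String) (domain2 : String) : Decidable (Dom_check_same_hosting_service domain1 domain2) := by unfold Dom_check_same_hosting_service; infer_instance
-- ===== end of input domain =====

-- B replaces A's per-indicator substring-membership loop with a naive multi-pattern
-- position scan building one indicator bitmask per domain, decided by ANDing the masks
-- (alternative algorithm, same cost).

-- ===== PORT A =====
-- the 'for cdn in cdn_indicators: if cdn in d1 and cdn in d2: return True' loop, step for step
def pvLoopA (d1 d2 : String) : List String → Bool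
  | [] => false
  | cdn :: rest =>
      if PySem.Str.isIn cdn d1 && PySem.Str.isIn cdn d2 then true
      else pvLoopA d1 d2 rest

def check_same_hosting_service (domain1 : String) (domain2 : String) : Bool :=
  let cdn_indicators : List String := ["cloudflare", "aws", "azure", "heroku", "netlify", "vercel"]
  let domain1_lower := PySem.Str.lower domain1
  let domain2_lower := PySem.Str.lower domain2
  pvLoopA domain1_lower domain2_lower cdn_indicators

-- ===== PORT B =====
def pvIndicators : List String := ["cloudflare", "aws", "azure", "heroku", "netlify", "vercel"]

-- 'indicator_mask': for i in range(len(d)+1): for bit, cdn in enumerate(cdn_indicators):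
--   if d[i:i+len(cdn)] == cdn: m |= 1 << bit
-- (the lowered string is handled as its code-point list; PySem.List.slice on it is exact for
--  Python's d[i:i+len(cdn)], and bc.2.toList.length is exactly Python's len(cdn))
def pvMask (domain : String) : Nat :=
  let d : List Char := (PySem.Str.lower domain).toList
  (PySem.List.pyRange 0 ((d.length : Int) + 1) 1).foldl
    (fun m i =>
      (PySem.List.enumerate pvIndicators 0).foldl
        (fun m' bc =>
          if PySem.List.slice d (some i) (some (i + (bc.2.toList.length : Int))) = bc.2.toList
          then m' ||| (1 <<< bc.1.toNat) else m') m)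
    0

def check_same_hosting_service_alt (domain1 : String) (domain2 : String) : Bool :=
  decide (pvMask domain1 &&& pvMask domain2 ≠ 0)

-- ===== PRECONDITION & SPEC =====
def Spec_check_same_hosting_service (domain1 : String) (domain2 : String) (out : Bool) : Prop := out = check_same_hosting_service_alt domain1 domain2
instance (domain1 : String) (domain2 : String) (out : Bool) : Decidable (Spec_check_same_hosting_service domain1 domain2 out) := by unfold Spec_check_same_hosting_service; infer_instance

-- ===== CLAIM (what is proved, stated in full; the proofs are below) =====
def Claim_equal_check_same_hosting_service : Prop := ∀ (domain1 : String) (domain2 : String), Dom_check_same_hosting_service domain1 domain2 → Spec_check_same_hosting_service domain1 domain2 (check_same_hosting_service domain1 domain2)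

-- ===== LEMMAS AND PROOFS =====

-- A's loop returns true iff some indicator occurs in both domains
theorem pvLoopA_eq_any (d1 d2 : String) (l : List String) :
    pvLoopA d1 d2 l = l.any (fun c => PySem.Str.isIn c d1 && PySem.Str.isIn c d2) := by
  induction l with
  | nil => rfl
  | cons c rest ih =>
      rcases h : (PySem.Str.isIn c d1 && PySem.Str.isIn c d2) with _ | _
      · simp only [pvLoopA, h, if_neg Bool.false_ne_true, List.any_cons, Bool.false_or, ih]
      · simp only [pvLoopA, h, if_true, List.any_cons, Bool.true_or]

-- B's proof-side packed mask: one bit (2^j) per matched indicator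
def pvPack (b0 b1 b2 b3 b4 b5 : Bool) : Nat :=
  (cond b0 1 0) ||| (cond b1 2 0) ||| (cond b2 4 0) ||| (cond b3 8 0) |||
  (cond b4 16 0) ||| (cond b5 32 0)

theorem pvCondBit (b : Bool) (c j k : Nat) (hc : c = 2^j) :
    (cond b c 0).testBit k = (b && decide (j = k)) := by
  cases b
  · simp
  · simp [hc, Nat.testBit_two_pow]

theorem pvPack_testBit (b0 b1 b2 b3 b4 b5 : Bool) (k : Nat) :
    (pvPack b0 b1 b2 b3 b4 b5).testBit k
      = (b0 && decide (0 = k) || (b1 && decide (1 = k) || (b2 && decide (2 = k) ||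
          (b3 && decide (3 = k) || (b4 && decide (4 = k) || b5 && decide (5 = k)))))) := by
  unfold pvPack
  rw [Nat.testBit_or, Nat.testBit_or, Nat.testBit_or, Nat.testBit_or, Nat.testBit_or,
      pvCondBit b0 1 0 k (by norm_num), pvCondBit b1 2 1 k (by norm_num),
      pvCondBit b2 4 2 k (by norm_num), pvCondBit b3 8 3 k (by norm_num),
      pvCondBit b4 16 4 k (by norm_num), pvCondBit b5 32 5 k (by norm_num)]
  rw [Bool.or_assoc, Bool.or_assoc, Bool.or_assoc, Bool.or_assoc]

-- bit k of the inner (per-position) fold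
theorem pvInnerBit (d : List Char) (i : Int) (E : List (Int × String)) (m k : Nat) :
    ((E.foldl
        (fun m' bc =>
          if PySem.List.slice d (some i) (some (i + (bc.2.toList.length : Int))) = bc.2.toList
          then m' ||| (1 <<< bc.1.toNat) else m') m).testBit k)
      = (m.testBit k ||
          E.any (fun bc =>
            decide (PySem.List.slice d (some i) (some (i + (bc.2.toList.length : Int))) = bc.2.toList)
              && decide (bc.1.toNat = k))) := by
  induction E generalizing m with
  | nil => simp
  | cons bc rest ih =>
      rw [List.foldl_cons, List.any_cons, ih]
      by_cases hp : PySem.List.slice d (some i) (some (i + (bc.2.toList.length : Int))) = bc.2.toList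
      · rw [if_pos hp, Nat.testBit_or, Nat.one_shiftLeft, Nat.testBit_two_pow]
        simp only [hp, decide_true, Bool.true_and, Bool.or_assoc]
      · rw [if_neg hp]
        simp only [hp, decide_false, Bool.false_and, Bool.false_or]

-- bit k of the whole position-scan fold
theorem pvOuterBit (d : List Char) (E : List (Int × String)) (R : List Int) (m k : Nat) :
    ((R.foldl
        (fun m i =>
          E.foldl
            (fun m' bc =>
              if PySem.List.slice d (some i) (some (i + (bc.2.toList.length : Int))) = bc.2.toList
              then m' ||| (1 <<< bc.1.toNat) else m') m) m).testBit k)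
      = (m.testBit k ||
          R.any (fun i =>
            E.any (fun bc =>
              decide (PySem.List.slice d (some i) (some (i + (bc.2.toList.length : Int))) = bc.2.toList)
                && decide (bc.1.toNat = k)))) := by
  induction R generalizing m with
  | nil => simp
  | cons i rest ih =>
      rw [List.foldl_cons, List.any_cons, ih, pvInnerBit, Bool.or_assoc]

theorem pvAnyOr {α : Type} (l : List α) (f g : α → Bool) :
    (l.any fun x => f x || g x) = (l.any f || l.any g) := by
  induction l with
  | nil => rfl
  | cons a t ih => simp [ih, Bool.or_assoc, Bool.or_comm, Bool.or_left_comm]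

theorem pvAnyConst {α : Type} (l : List α) (f : α → Bool) (c : Bool) :
    (l.any fun x => f x && c) = (l.any f && c) := by
  cases c <;> simp

-- some position of d starts indicator c  ⟺  c occurs in d
theorem pvOcc (c d : List Char) :
    ((PySem.List.pyRange 0 ((d.length : Int) + 1) 1).any
        (fun i => decide (PySem.List.slice d (some i) (some (i + (c.length : Int))) = c)))
      = PySem.Chars.isIn c d := by
  rw [Bool.eq_iff_iff]
  simp only [List.any_eq_true, decide_eq_true_eq, PySem.List.mem_pyRange_one]
  constructor
  · rintro ⟨i, ⟨h0, _⟩, hsl⟩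
    obtain ⟨j, rfl⟩ := Int.eq_ofNat_of_zero_le h0
    rw [PySem.List.slice_natCast_add] at hsl
    exact (PySem.Chars.exists_prefix_drop_iff_isIn c d).mp
      ⟨j, List.prefix_iff_eq_take.mpr hsl.symm⟩
  · intro h
    obtain ⟨j, hpre⟩ := (PySem.Chars.exists_prefix_drop_iff_isIn c d).mpr h
    have hpre' : c <+: d.drop (min j d.length) := by
      rcases Nat.le_total j d.length with hle | hge
      · simpa [min_eq_left hle] using hpre
      · have hnil : d.drop j = [] := List.drop_eq_nil_of_le hge
        rw [hnil] at hpre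
        simp [List.prefix_nil.mp hpre]
    refine ⟨((min j d.length : Nat) : Int), ⟨by omega, by omega⟩, ?_⟩
    rw [PySem.List.slice_natCast_add]
    exact (List.prefix_iff_eq_take.mp hpre').symm

theorem pvMask_eq_pack (domain : String) :
    pvMask domain
      = pvPack
          (PySem.Chars.isIn "cloudflare".toList ((PySem.Str.lower domain).toList))
          (PySem.Chars.isIn "aws".toList ((PySem.Str.lower domain).toList))
          (PySem.Chars.isIn "azure".toList ((PySem.Str.lower domain).toList))
          (PySem.Chars.isIn "heroku".toList ((PySem.Str.lower domain).toList))
          (PySem.Chars.isIn "netlify".toList ((PySem.Str.lower domain).toList))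
          (PySem.Chars.isIn "vercel".toList ((PySem.Str.lower domain).toList)) := by
  apply Nat.eq_of_testBit_eq
  intro k
  simp only [pvMask]
  rw [pvOuterBit, pvPack_testBit]
  simp only [pvIndicators, PySem.List.enumerate_cons, PySem.List.enumerate_nil,
    List.any_cons, List.any_nil, Bool.or_false, Bool.false_or, Nat.zero_testBit]
  simp only [pvAnyOr, pvAnyConst]
  rw [pvOcc, pvOcc, pvOcc, pvOcc, pvOcc, pvOcc]
  simp only [show ((0:Int)).toNat = 0 from rfl, show ((0:Int)+1).toNat = 1 from rfl,
    show ((0:Int)+1+1).toNat = 2 from rfl, show ((0:Int)+1+1+1).toNat = 3 from rfl,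
    show ((0:Int)+1+1+1+1).toNat = 4 from rfl, show ((0:Int)+1+1+1+1+1).toNat = 5 from rfl,
    show ((1:Int)).toNat = 1 from rfl, show ((2:Int)).toNat = 2 from rfl,
    show ((3:Int)).toNat = 3 from rfl, show ((4:Int)).toNat = 4 from rfl,
    show ((5:Int)).toNat = 5 from rfl]

theorem pvPack_and_pack (a0 a1 a2 a3 a4 a5 b0 b1 b2 b3 b4 b5 : Bool) :
    pvPack a0 a1 a2 a3 a4 a5 &&& pvPack b0 b1 b2 b3 b4 b5
      = pvPack (a0 && b0) (a1 && b1) (a2 && b2) (a3 && b3) (a4 && b4) (a5 && b5) := by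
  apply Nat.eq_of_testBit_eq
  intro k
  rw [Nat.testBit_and, pvPack_testBit, pvPack_testBit, pvPack_testBit]
  by_cases h0 : (0:Nat) = k
  · subst h0; simp
  by_cases h1 : (1:Nat) = k
  · subst h1; simp
  by_cases h2 : (2:Nat) = k
  · subst h2; simp
  by_cases h3 : (3:Nat) = k
  · subst h3; simp
  by_cases h4 : (4:Nat) = k
  · subst h4; simp
  by_cases h5 : (5:Nat) = k
  · subst h5; simp
  simp [h0, h1, h2, h3, h4, h5]

theorem pvPack_ne (c0 c1 c2 c3 c4 c5 : Bool) :
    decide (pvPack c0 c1 c2 c3 c4 c5 ≠ 0)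
      = (c0 || (c1 || (c2 || (c3 || (c4 || c5))))) := by
  cases c0 <;> cases c1 <;> cases c2 <;> cases c3 <;> cases c4 <;> cases c5 <;> rfl

-- ===== VERDICT (by name: the statement is the Claim_ definition above) =====
theorem check_same_hosting_service_spec : Claim_equal_check_same_hosting_service := by
  intro d1 d2 _
  unfold Spec_check_same_hosting_service check_same_hosting_service check_same_hosting_service_alt
  rw [pvLoopA_eq_any, pvMask_eq_pack d1, pvMask_eq_pack d2, pvPack_and_pack, pvPack_ne]
  simp only [List.any_cons, List.any_nil, Bool.or_false, PySem.Str.isIn_eq]
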